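-- pv_equiv track=rewrite | github.com/vgolskiy/preparation | max_binary_gap/max_binary_gap.py | solution
-- ===== SOURCE A (Python) =====
-- def solution(N):
--     gap = False
--     maximal = 0
--     qty = 0
--     while N:
--         if N%2:
--             gap = True
--             if qty:
--                 if qty > maximal:
--                     maximal = qty
--                 qty = 0
--         elif gap or (not gap and qty):
--             qty += 1
--             gap = False
--         N = N//2
--     return maximal
-- ===== SOURCE B (Python) =====
-- def solution(N):
--     s = bin(N)[2:].strip('0')
--     return max((len(g) for g in s.split('1')), default=0)
-- ===== Notes on version B (the rewrite author's own statement) =====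
-- stated objective: idiomatic
-- what changed: Replaces the stateful bit-by-bit halving loop (gap/qty flags) with a string formulation: take the binary representation, strip boundary zeros, split on '1' and return the longest piece.
import Mathlib
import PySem

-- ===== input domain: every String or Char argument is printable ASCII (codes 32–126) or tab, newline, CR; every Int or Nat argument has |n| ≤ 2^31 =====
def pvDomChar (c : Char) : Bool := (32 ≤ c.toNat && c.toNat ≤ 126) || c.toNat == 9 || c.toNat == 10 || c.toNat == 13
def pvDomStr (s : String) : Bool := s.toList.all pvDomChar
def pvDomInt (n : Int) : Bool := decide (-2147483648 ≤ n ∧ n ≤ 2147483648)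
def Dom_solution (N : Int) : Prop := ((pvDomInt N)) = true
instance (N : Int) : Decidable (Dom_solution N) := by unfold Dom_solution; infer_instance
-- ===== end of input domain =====

-- B replaces A's stateful bit-by-bit halving loop with a string formulation (binary string,
-- strip boundary zeros, split on '1', longest piece): idiomatic, same cost.

-- ===== PORT A =====
-- the while-loop of A; 'while N' exits at N = 0.  For N < 0 Python never terminates
-- (N//2 stalls at -1), so the guard returns on N ≤ 0 — those inputs are excluded by Pre_.
def solutionLoop (N : Int) (gap : Bool) (maximal qty : Int) : Int :=
  if _h : N ≤ 0 then maximal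
  else
    if PySem.Int.mod N 2 ≠ 0 then
      -- gap = True; if qty: (if qty > maximal: maximal = qty); qty = 0
      solutionLoop (PySem.Int.floordiv N 2) true
        (if qty ≠ 0 then (if qty > maximal then qty else maximal) else maximal)
        (if qty ≠ 0 then 0 else qty)
    else if gap || (!gap && qty ≠ 0) then
      solutionLoop (PySem.Int.floordiv N 2) false maximal (qty + 1)
    else
      solutionLoop (PySem.Int.floordiv N 2) gap maximal qty
  termination_by N.toNat
  decreasing_by
  all_goals
    · have h2 : PySem.Int.floordiv N 2 = N / 2 :=
        PySem.Int.floordiv_eq_ediv_of_pos (by omega)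
      rw [h2]; omega

def solution (N : Int) : Int := solutionLoop N false 0 0

-- ===== PORT B =====
-- bin(N)[2:] for N > 0, ported by hand (PySem has no bin): digits MSB first; exact for N ≥ 0.
def binDigits (n : Nat) : List Char :=
  if _h : n = 0 then []
  else binDigits (n / 2) ++ [if n % 2 = 1 then '1' else '0']
  termination_by n
  decreasing_by omega

def solution_alt (N : Int) : Int :=
  -- s = bin(N)[2:].strip('0')   (bin(N)[2:] is "0" when N = 0; Pre_ gives N ≥ 0)
  let sbin : List Char := if N ≤ 0 then ['0'] else binDigits N.toNat
  let s : List Char := PySem.Chars.stripChars sbin ['0']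
  -- max((len(g) for g in s.split('1')), default=0)
  PySem.List.maxD ((PySem.Chars.splitOn s ['1']).map (fun g => (g.length : Int)))
    (fun x => x) 0

-- ===== PRECONDITION & SPEC =====
-- Pre_ excludes N < 0 only: there A never returns ('while N' with N//2 stalling at -1 loops forever).
def Pre_solution (N : Int) : Prop := 0 ≤ N
instance (N : Int) : Decidable (Pre_solution N) := by unfold Pre_solution; infer_instance
def pvWitness_solution : Int := (9)

def Spec_solution (N : Int) (out : Int) : Prop := out = solution_alt N
instance (N : Int) (out : Int) : Decidable (Spec_solution N out) := by unfold Spec_solution; infer_instance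

-- ===== CLAIM (what is proved, stated in full; the proofs are below) =====
def Claim_equal_solution : Prop := ∀ (N : Int), Dom_solution N → Pre_solution N → Spec_solution N (solution N)

-- ===== LEMMAS AND PROOFS =====

-- ---------- recursive views of both programs ----------
def bitChar (b : Bool) : Char := if b then '1' else '0'

def bitsLH (n : Nat) : List Bool :=
  if h : n = 0 then [] else (n % 2 == 1) :: bitsLH (n / 2)
  termination_by n
  decreasing_by omega

def actB : List Bool → Int → Int → Int
  | [], _, m => m
  | true :: l, c, m => actB l 0 (max m c)
  | false :: l, c, m => actB l (c + 1) m

def startScanB : List Bool → Int → Int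
  | [], m => m
  | true :: l, m => actB l 0 m
  | false :: l, m => startScanB l m

def bLens : Int → List Bool → List Int
  | c, [] => [c]
  | c, true :: l => c :: bLens 0 l
  | c, false :: l => bLens (c + 1) l

def splitAux : List Char → List Char → List (List Char)
  | [], cur => [cur]
  | c :: rest, cur => if c = '1' then cur :: splitAux rest [] else splitAux rest (cur ++ [c])

def sLens : Int → List Char → List Int
  | c, [] => [c]
  | c, ch :: l => if ch = '1' then c :: sLens 0 l else sLens (c + 1) l

-- ---------- A-side ----------
theorem loop_act (n : Nat) : ∀ (g : Bool) (q m : Int), (g = true ∨ q ≠ 0) → 0 ≤ q → 0 ≤ m →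
    solutionLoop (n : Int) g m q = actB (bitsLH n) q m := by
  induction n using Nat.strong_induction_on with
  | _ n ih =>
    intro g q m hact hq hm
    rw [solutionLoop, bitsLH]
    by_cases h0 : n = 0
    · simp [h0, actB]
    · have hpos : ¬ ((n : Int) ≤ 0) := by omega
      have hmod : PySem.Int.mod (n : Int) 2 = ((n % 2 : Nat) : Int) := by
        exact_mod_cast PySem.Int.mod_natCast n 2
      have hdiv : PySem.Int.floordiv (n : Int) 2 = ((n / 2 : Nat) : Int) := by
        exact_mod_cast PySem.Int.floordiv_natCast n 2
      simp only [h0, dif_neg hpos, hmod, hdiv, if_neg]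
      rcases Nat.mod_two_eq_zero_or_one n with he | ho
      · -- even bit: false
        have : ¬ (((n % 2 : Nat) : Int) ≠ 0) := by simp [he]
        rw [if_neg this]
        have hcond : (g || (!g && decide (q ≠ 0))) = true := by
          rcases hact with h | h
          · simp [h]
          · cases g <;> simp [h]
        rw [if_pos hcond]
        rw [ih (n / 2) (by omega) false (q + 1) m (Or.inr (by omega)) (by omega) hm]
        simp [he, actB]
      · -- odd bit: true
        have hne : (((n % 2 : Nat) : Int) ≠ 0) := by simp [ho]
        rw [if_pos hne]
        rw [ih (n / 2) (by omega) true (if q ≠ 0 then 0 else q)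
              (if q ≠ 0 then (if q > m then q else m) else m) (Or.inl rfl)
              (by split_ifs <;> omega) (by split_ifs <;> omega)]
        have h1 : (if q ≠ 0 then (if q > m then q else m) else m) = max m q := by
          split_ifs <;> omega
        have h2 : (if q ≠ 0 then (0 : Int) else q) = 0 := by split_ifs <;> omega
        simp [ho, actB, h1, h2]

theorem loop_pre (n : Nat) : ∀ (m : Int), 0 ≤ m →
    solutionLoop (n : Int) false m 0 = startScanB (bitsLH n) m := by
  induction n using Nat.strong_induction_on with
  | _ n ih =>
    intro m hm
    rw [solutionLoop, bitsLH]
    by_cases h0 : n = 0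
    · simp [h0, startScanB]
    · have hpos : ¬ ((n : Int) ≤ 0) := by omega
      have hmod : PySem.Int.mod (n : Int) 2 = ((n % 2 : Nat) : Int) := by
        exact_mod_cast PySem.Int.mod_natCast n 2
      have hdiv : PySem.Int.floordiv (n : Int) 2 = ((n / 2 : Nat) : Int) := by
        exact_mod_cast PySem.Int.floordiv_natCast n 2
      simp only [h0, dif_neg hpos, hmod, hdiv, if_neg]
      rcases Nat.mod_two_eq_zero_or_one n with he | ho
      · have : ¬ (((n % 2 : Nat) : Int) ≠ 0) := by simp [he]
        rw [if_neg this]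
        have hcond : (false || (!false && decide ((0:Int) ≠ 0))) = false := by simp
        rw [hcond, if_neg (by simp)]
        rw [ih (n / 2) (by omega) m hm]
        simp [he, startScanB]
      · have hne : (((n % 2 : Nat) : Int) ≠ 0) := by simp [ho]
        rw [if_pos hne]
        have h1 : (if (0:Int) ≠ 0 then (if (0:Int) > m then (0:Int) else m) else m) = m := by simp
        have h2 : (if (0:Int) ≠ 0 then (0 : Int) else 0) = 0 := by simp
        rw [h1, h2, loop_act (n / 2) true 0 m (Or.inl rfl) le_rfl hm]
        simp [ho, startScanB]

-- ---------- B-side: binary digits ----------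
theorem binDigits_eq (n : Nat) : binDigits n = ((bitsLH n).map bitChar).reverse := by
  induction n using Nat.strong_induction_on with
  | _ n ih =>
    rw [binDigits, bitsLH]
    by_cases h0 : n = 0
    · simp [h0]
    · rw [dif_neg h0, dif_neg h0, ih (n / 2) (by omega)]
      have hb : (if n % 2 = 1 then '1' else '0') = bitChar (n % 2 == 1) := by
        rcases Nat.mod_two_eq_zero_or_one n with he | ho
        · simp [he, bitChar]
        · simp [ho, bitChar]
      simp [hb]

-- ---------- B-side: splitOn characterisation ----------
theorem go_eq : ∀ (fuel : Nat) (l cur : List Char) (acc : List (List Char)),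
    l.length < fuel →
    PySem.Chars.splitOn.go ['1'] fuel l cur acc = acc.reverse ++ splitAux l cur.reverse := by
  intro fuel
  induction fuel with
  | zero => intro l cur acc h; omega
  | succ fuel ih =>
    intro l cur acc h
    cases l with
    | nil => simp [PySem.Chars.splitOn.go, splitAux]
    | cons c rest =>
      by_cases hc : c = '1'
      · have hpre : List.isPrefixOf ['1'] (c :: rest) = true := by
          simp [List.isPrefixOf, hc]
        simp only [PySem.Chars.splitOn.go, hpre, if_true, List.length_cons,
          List.length_nil, List.drop_succ_cons, List.drop_zero]
        rw [ih rest [] (cur.reverse :: acc) (by simp at h; omega)]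
        simp [splitAux, hc]
      · have hpre : List.isPrefixOf ['1'] (c :: rest) = false := by
          simp only [List.isPrefixOf, List.isPrefixOf_nil_left, Bool.and_true]
          simp [beq_iff_eq]; exact fun h => absurd h.symm hc
        simp only [PySem.Chars.splitOn.go, hpre, Bool.false_eq_true, if_false]
        rw [ih rest (c :: cur) acc (by simp at h; omega)]
        simp [splitAux, hc]

theorem splitOn_eq (s : List Char) : PySem.Chars.splitOn s ['1'] = splitAux s [] := by
  rw [PySem.Chars.splitOn, go_eq (s.length + 1) s [] [] (by omega)]
  simp

theorem splitAux_lens : ∀ (l cur : List Char),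
    (splitAux l cur).map (fun g => (g.length : Int)) = sLens (cur.length) l := by
  intro l
  induction l with
  | nil => intro cur; simp [splitAux, sLens]
  | cons c rest ih =>
    intro cur
    by_cases hc : c = '1'
    · simp [splitAux, sLens, hc, ih []]
    · have h2 := ih (cur ++ [c])
      simp [splitAux, sLens, hc]
      rw [h2]
      have : ((cur ++ [c]).length : Int) = 1 + (cur.length : Int) := by
        simp; omega
      rw [this, add_comm]

theorem sLens_map : ∀ (c : Int) (l : List Bool), sLens c (l.map bitChar) = bLens c l := by
  intro c l
  induction l generalizing c with
  | nil => simp [sLens, bLens]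
  | cons b rest ih => cases b <;> simp [sLens, bLens, bitChar, ih]

-- ---------- bLens facts ----------
theorem bLens_ne_nil : ∀ (c : Int) (l : List Bool), bLens c l ≠ [] := by
  intro c l
  induction l generalizing c with
  | nil => simp [bLens]
  | cons b rest ih => cases b <;> simp [bLens, ih]

theorem bLens_head : ∀ (l : List Bool), ∃ h t, ∀ (c : Int), bLens c l = (h + c) :: t := by
  intro l
  induction l with
  | nil => exact ⟨0, [], fun c => by simp [bLens]⟩
  | cons b rest ih =>
    obtain ⟨h, t, hht⟩ := ih
    cases b
    · refine ⟨h + 1, t, fun c => ?_⟩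
      rw [show bLens c (false :: rest) = bLens (c + 1) rest from rfl, hht (c + 1),
        show h + (c + 1) = h + 1 + c from by ring]
    · exact ⟨0, bLens 0 rest, fun c => by simp [bLens]⟩

theorem bLens_cons : ∀ (l : List Bool) (c : Int),
    ∃ h t, bLens 0 l = h :: t ∧ bLens c l = (h + c) :: t := by
  intro l c
  obtain ⟨h, t, hht⟩ := bLens_head l
  exact ⟨h, t, by simpa using hht 0, hht c⟩

theorem bLens_nonneg : ∀ (l : List Bool) (c : Int), 0 ≤ c → ∀ x ∈ bLens c l, 0 ≤ x := by
  intro l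
  induction l with
  | nil => intro c hc x hx; simp [bLens] at hx; omega
  | cons b rest ih =>
    intro c hc x hx
    cases b
    · exact ih (c + 1) (by omega) x (by simpa [bLens] using hx)
    · simp [bLens] at hx
      rcases hx with h | h
      · omega
      · exact ih 0 le_rfl x (by simpa using h)

theorem bLens_append_true : ∀ (l : List Bool) (c : Int),
    bLens c (l ++ [true]) = bLens c l ++ [0] := by
  intro l
  induction l with
  | nil => intro c; simp [bLens]
  | cons b rest ih => intro c; cases b <;> simp [bLens, ih]

theorem bLens_append_false : ∀ (l : List Bool) (c : Int),
    bLens c (l ++ [false]) = (bLens c l).dropLast ++ [(bLens c l).getLast?.getD 0 + 1] := by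
  intro l
  induction l with
  | nil => intro c; simp [bLens]
  | cons b rest ih =>
    intro c
    cases b
    · simpa [bLens] using ih (c + 1)
    · obtain ⟨x, X, hX, -⟩ := bLens_cons rest 0
      have h1 := ih 0
      rw [show bLens c (true :: rest ++ [false]) = c :: bLens 0 (rest ++ [false]) from rfl,
          show bLens c (true :: rest) = c :: bLens 0 rest from rfl, h1, hX]
      simp

theorem bLens_rev : ∀ (l : List Bool), bLens 0 l.reverse = (bLens 0 l).reverse := by
  intro l
  induction l with
  | nil => simp [bLens]
  | cons b rest ih =>
    cases b
    · rw [List.reverse_cons, bLens_append_false, ih]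
      obtain ⟨h, t, h1, h2⟩ := bLens_cons rest 1
      rw [show bLens 0 (false :: rest) = bLens 1 rest from rfl, h1, h2]
      simp
    · rw [List.reverse_cons, bLens_append_true, ih]
      rw [show bLens 0 (true :: rest) = 0 :: bLens 0 rest from rfl]
      simp

theorem bLens_last_true : ∀ (l : List Bool) (c : Int), l.getLast? = some true →
    (bLens c l).getLast? = some 0 := by
  intro l
  induction l with
  | nil => intro c h; simp at h
  | cons b rest ih =>
    intro c h
    cases hr : rest with
    | nil =>
      subst hr
      simp at h
      subst h
      simp [bLens]
    | cons b' rest' =>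
      have h2 : rest.getLast? = some true := by
        rw [hr] at h ⊢
        simpa using h
      rw [← hr] at *
      cases b
      · rw [show bLens c (false :: rest) = bLens (c + 1) rest from rfl]
        exact ih (c + 1) h2
      · obtain ⟨x, X, hX, -⟩ := bLens_cons rest 0
        rw [show bLens c (true :: rest) = c :: bLens 0 rest from rfl, hX]
        have h5 := ih 0 h2
        rw [hX] at h5
        simpa using h5

-- ---------- foldl max facts ----------
theorem foldl_max_pull : ∀ (l : List Int) (m x : Int),
    l.foldl max (max m x) = max (l.foldl max m) x := by
  intro l
  induction l with
  | nil => intro m x; rfl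
  | cons y l ih =>
    intro m x
    show l.foldl max (max (max m x) y) = _
    rw [max_right_comm, ih]
    rfl

theorem foldl_max_rev : ∀ (l : List Int) (m : Int),
    l.reverse.foldl max m = l.foldl max m := by
  intro l
  induction l with
  | nil => intro m; rfl
  | cons x l ih =>
    intro m
    rw [List.reverse_cons, List.foldl_append]
    show max (l.reverse.foldl max m) x = _
    rw [ih, show (x :: l).foldl max m = l.foldl max (max m x) from rfl, foldl_max_pull]

-- ---------- actB / startScanB ----------
theorem actB_eq : ∀ (l : List Bool) (c m : Int),
    actB l c m = (bLens c l).dropLast.foldl max m := by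
  intro l
  induction l with
  | nil => intro c m; simp [actB, bLens]
  | cons b rest ih =>
    intro c m
    cases b
    · simpa [actB, bLens] using ih (c + 1) m
    · obtain ⟨x, X, hX, -⟩ := bLens_cons rest 0
      rw [show actB (true :: rest) c m = actB rest 0 (max m c) from rfl, ih,
          show bLens c (true :: rest) = c :: bLens 0 rest from rfl, hX]
      simp

theorem startScan_dropWhile : ∀ (l : List Bool) (m : Int),
    startScanB l m = startScanB (l.dropWhile (fun b => b == false)) m := by
  intro l
  induction l with
  | nil => intro m; rfl
  | cons b rest ih =>
    intro m
    cases b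
    · simpa [startScanB, List.dropWhile] using ih m
    · simp [List.dropWhile]

theorem bitsLH_last : ∀ (n : Nat), n ≠ 0 → (bitsLH n).getLast? = some true := by
  intro n
  induction n using Nat.strong_induction_on with
  | _ n ih =>
    intro h0
    rw [bitsLH, dif_neg h0]
    by_cases h2 : n / 2 = 0
    · have h1 : n = 1 := by omega
      subst h1
      simp [bitsLH]
    · have h3 := ih (n / 2) (by omega) h2
      have h4 : bitsLH (n / 2) ≠ [] := by
        intro he
        rw [he] at h3
        simp at h3
      obtain ⟨y, ys, hys⟩ := List.exists_cons_of_ne_nil h4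
      rw [hys] at h3 ⊢
      simpa using h3

-- ---------- assembling B for positive n ----------
theorem dropWhile_head_false {α : Type} (p : α → Bool) :
    ∀ (l : List α) (b : α) (t : List α), l.dropWhile p = b :: t → p b = false := by
  intro l
  induction l with
  | nil => intro b t h; simp at h
  | cons a l ih =>
    intro b t h
    by_cases hpa : p a
    · rw [List.dropWhile_cons_of_pos hpa] at h
      exact ih b t h
    · rw [List.dropWhile_cons_of_neg hpa] at h
      cases h
      simpa using hpa

theorem strip_eq (n : Nat) (h0 : n ≠ 0) :
    PySem.Chars.stripChars (binDigits n) ['0'] =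
      ((bitsLH n).dropWhile (fun b => b == false)).reverse.map bitChar := by
  have hlast := bitsLH_last n h0
  rw [binDigits_eq]
  have hzeta : ∀ (s : List Char), PySem.Chars.stripChars s ['0'] =
      (List.dropWhile (fun c => List.contains ['0'] c)
        (List.dropWhile (fun c => List.contains ['0'] c) s).reverse).reverse := fun s => rfl
  rw [hzeta]
  have hne : ((bitsLH n).map bitChar).reverse ≠ [] := by
    intro he
    rw [List.reverse_eq_nil_iff, List.map_eq_nil_iff] at he
    rw [he] at hlast
    simp at hlast
  obtain ⟨c, t, hct⟩ := List.exists_cons_of_ne_nil hne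
  have h1 : some c = ((bitsLH n).getLast?).map bitChar := by
    rw [← List.getLast?_map, ← List.head?_reverse, hct]
    rfl
  rw [hlast] at h1
  have hc1 : c = '1' := by simpa [bitChar] using h1
  have hdw1 : List.dropWhile (fun c => List.contains ['0'] c) (((bitsLH n).map bitChar).reverse) =
      ((bitsLH n).map bitChar).reverse := by
    rw [hct, List.dropWhile_cons_of_neg (by simp [hc1])]
  rw [hdw1, List.reverse_reverse, List.dropWhile_map]
  have hpf : ((fun c => List.contains ['0'] c) ∘ bitChar) = (fun b => b == false) := by
    funext b; cases b <;> rfl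
  rw [hpf, ← List.map_reverse]

theorem foldl_from_head (x : Int) (t : List Int) (hx : 0 ≤ x) :
    t.foldl max x = (x :: t).foldl max 0 := by
  show _ = t.foldl max (max 0 x)
  rw [max_eq_right hx]

theorem alt_pos (n : Nat) (h0 : n ≠ 0) :
    solution_alt (n : Int) =
      ((bLens 0 ((bitsLH n).dropWhile (fun b => b == false))).foldl max 0) := by
  have hpos : ¬ ((n : Int) ≤ 0) := by omega
  unfold solution_alt
  simp only [if_neg hpos]
  rw [show ((n : Int)).toNat = n from by omega, strip_eq n h0]
  set u := (bitsLH n).dropWhile (fun b => b == false) with hu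
  rw [splitOn_eq]
  unfold PySem.List.maxD
  have hlens : (splitAux (u.reverse.map bitChar) []).map (fun g => (g.length : Int)) =
      (bLens 0 u).reverse := by
    rw [splitAux_lens]
    show sLens ((0 : Nat) : Int) _ = _
    rw [Nat.cast_zero, sLens_map, bLens_rev]
  have hne : (bLens 0 u).reverse ≠ [] := by simp [bLens_ne_nil]
  obtain ⟨x, t, hxt⟩ := List.exists_cons_of_ne_nil hne
  have hx : 0 ≤ x := by
    have hmem : x ∈ (bLens 0 u).reverse := by rw [hxt]; exact List.mem_cons_self
    exact bLens_nonneg u 0 le_rfl x (List.mem_reverse.mp hmem)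
  rw [hlens, hxt, PySem.List.max?_id_cons]
  show t.foldl max x = _
  rw [foldl_from_head x t hx, ← hxt, foldl_max_rev]

-- the common closed form: A's scan and B's split agree on the stripped bit list
theorem scan_eq_foldl (n : Nat) (h0 : n ≠ 0) :
    startScanB ((bitsLH n).dropWhile (fun b => b == false)) 0 =
      (bLens 0 ((bitsLH n).dropWhile (fun b => b == false))).foldl max 0 := by
  set u := (bitsLH n).dropWhile (fun b => b == false) with hu
  cases hcase : u with
  | nil => simp [startScanB, bLens, hcase]
  | cons b u' =>
    have hdrop : (bitsLH n).dropWhile (fun b => b == false) = b :: u' := by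
      rw [← hu]; exact hcase
    have hb : b = true := by
      have := dropWhile_head_false (fun b => b == false) (bitsLH n) b u' hdrop
      simpa using this
    subst hb
    show startScanB (true :: u') 0 = (bLens 0 (true :: u')).foldl max 0
    rw [show startScanB (true :: u') 0 = actB u' 0 0 from rfl, actB_eq,
        show bLens 0 (true :: u') = 0 :: bLens 0 u' from rfl,
        show (0 :: bLens 0 u').foldl max 0 = (bLens 0 u').foldl max (max 0 0) from rfl,
        show max (0:Int) 0 = 0 from rfl]
    by_cases hnil : u' = []
    · subst hnil; simp [bLens]
    · have h1 : (bitsLH n).getLast? = some true := bitsLH_last n h0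
      rw [← List.takeWhile_append_dropWhile (p := fun b => b == false) (l := bitsLH n),
          hdrop, List.getLast?_append_of_ne_nil _ (by simp)] at h1
      have hlast : u'.getLast? = some true := by
        obtain ⟨b', u'', he⟩ := List.exists_cons_of_ne_nil hnil
        rw [he] at h1 ⊢
        simpa using h1
      have h3 : (bLens 0 u').getLast? = some 0 := bLens_last_true u' 0 hlast
      have h4 : (bLens 0 u').dropLast ++ [0] = bLens 0 u' :=
        List.dropLast_append_getLast? 0 h3
      conv_rhs => rw [← h4, List.foldl_append]
      have h5 : (0:Int) ≤ ((bLens 0 u').dropLast).foldl max 0 :=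
        (PySem.List.le_foldl_max _ 0).1
      show _ = max _ 0
      rw [max_eq_left h5]

-- ===== VERDICT (by name: the statement is the Claim_ definition above) =====
theorem solution_spec : Claim_equal_solution := by
  unfold Claim_equal_solution Spec_solution Pre_solution
  intro N _hdom hpre
  by_cases h0 : N = 0
  · subst h0
    have hA : solution 0 = 0 := by rw [solution, solutionLoop]; norm_num
    have hB : solution_alt 0 = 0 := by decide
    rw [hA, hB]
  · have hn0 : N.toNat ≠ 0 := by omega
    have hn : N = ((N.toNat : Nat) : Int) := by omega
    rw [hn,
        show solution ((N.toNat : Nat) : Int) = solutionLoop ((N.toNat : Nat) : Int) false 0 0 from rfl,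
        loop_pre N.toNat 0 le_rfl, startScan_dropWhile, scan_eq_foldl N.toNat hn0,
        ← alt_pos N.toNat hn0]
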